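-- pv_equiv track=rewrite | github.com/ram-elgov/cs1001py | hw/hw3/hw3_206867517.py | find_local_min
-- ===== SOURCE A (Python) =====
-- def find_local_min(lst):
--     """ input: non empty list return: a local minima index """
--     left = 0
--     right = len(lst) - 1
--     while left <= right:
--         mid = (right + left) // 2
--         if ((mid == 0 or lst[mid - 1] >= lst[mid]) and
--                 (mid == len(lst) - 1 or lst[mid] <= lst[mid + 1])):
--             return mid
--         elif mid < len(lst) - 1 and lst[mid + 1] < lst[mid]:
--             left = mid + 1
--         elif mid > 0 and lst[mid - 1] < lst[mid]:
--             right = mid - 1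
-- ===== SOURCE B (Python) =====
-- def find_local_min(lst):
--     """ input: non empty list return: a local minima index """
--     def go(left, right):
--         mid = (left + right) // 2
--         if ((mid == 0 or lst[mid - 1] >= lst[mid]) and
--                 (mid == len(lst) - 1 or lst[mid] <= lst[mid + 1])):
--             return mid
--         if mid < len(lst) - 1 and lst[mid + 1] < lst[mid]:
--             return go(mid + 1, right)
--         return go(left, mid - 1)
--     return go(0, len(lst) - 1)
-- ===== Notes on version B (the rewrite author's own statement) =====
-- stated objective: alternative
-- what changed: Replaces A's while-loop with mutable left/right state and guarded elif fall-through by a recursive helper go(left, right) that returns directly from each branch (loop-to-recursion decomposition with the same midpoint test).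
-- outside the precondition, e.g. on find_local_min([]): A returns None, B raises IndexError
import Mathlib
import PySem

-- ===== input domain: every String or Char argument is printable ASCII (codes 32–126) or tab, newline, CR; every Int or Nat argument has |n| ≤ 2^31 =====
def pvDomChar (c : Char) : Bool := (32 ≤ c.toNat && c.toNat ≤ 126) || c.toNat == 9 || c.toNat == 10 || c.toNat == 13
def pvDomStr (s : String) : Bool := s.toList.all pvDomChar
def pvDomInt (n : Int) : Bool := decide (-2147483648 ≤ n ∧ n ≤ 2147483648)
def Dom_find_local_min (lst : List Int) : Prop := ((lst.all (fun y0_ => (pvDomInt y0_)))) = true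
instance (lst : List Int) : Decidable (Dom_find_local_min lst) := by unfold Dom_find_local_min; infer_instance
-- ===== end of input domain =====

-- B replaces A's while-loop with mutable state by a recursive helper returning from each branch
-- (same midpoint test, loop → recursion decomposition); return-value equivalence only.

-- Python lst[i]: on every state the ports reach under Pre_, i is in range, so the default is never used.
def pvAt (lst : List Int) (i : Int) : Int := (PySem.List.pyGet? lst i).getD 0

-- ===== PORT A =====
-- A's while-loop, step for step; fuel only makes the loop total (Python's loop always
-- terminates on Int lists; the fall-through arm repeats the unchanged state like Python would).
def findLoopA (lst : List Int) (left right : Int) : Nat → Int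
  | 0 => 0
  | fuel + 1 =>
    if left ≤ right then
      let mid := PySem.Int.floordiv (right + left) 2
      if (mid = 0 ∨ pvAt lst (mid - 1) ≥ pvAt lst mid) ∧
         (mid = (lst.length : Int) - 1 ∨ pvAt lst mid ≤ pvAt lst (mid + 1)) then mid
      else if mid < (lst.length : Int) - 1 ∧ pvAt lst (mid + 1) < pvAt lst mid then
        findLoopA lst (mid + 1) right fuel
      else if 0 < mid ∧ pvAt lst (mid - 1) < pvAt lst mid then
        findLoopA lst left (mid - 1) fuel
      else
        findLoopA lst left right fuel
    else 0  -- loop exit: Python returns None here; excluded by Pre_ (only the empty list reaches it)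

def find_local_min (lst : List Int) : Int :=
  findLoopA lst 0 ((lst.length : Int) - 1) (lst.length + 1)

-- termination facts for goB, cited by name in its decreasing_by
theorem goB_dec1 {left right : Int} (h : left ≤ right) :
    (right - (PySem.Int.floordiv (left + right) 2 + 1) + 1).toNat < (right - left + 1).toNat := by
  have := PySem.Int.floordiv_two_mid_bounds h
  omega
theorem goB_dec2 {left right : Int} (h : left ≤ right) :
    (PySem.Int.floordiv (left + right) 2 - 1 - left + 1).toNat < (right - left + 1).toNat := by
  have := PySem.Int.floordiv_two_mid_bounds h
  omega

-- ===== PORT B =====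
-- B's recursive helper go(left, right); the 'if h : …' guard only provides termination
-- (under Pre_ the recursion always returns before left > right, exactly as in Source B).
def goB (lst : List Int) (left right : Int) : Int :=
  if h : left ≤ right then
    let mid := PySem.Int.floordiv (left + right) 2
    if (mid = 0 ∨ pvAt lst (mid - 1) ≥ pvAt lst mid) ∧
       (mid = (lst.length : Int) - 1 ∨ pvAt lst mid ≤ pvAt lst (mid + 1)) then mid
    else if mid < (lst.length : Int) - 1 ∧ pvAt lst (mid + 1) < pvAt lst mid then
      goB lst (mid + 1) right
    else
      goB lst left (mid - 1)
  else 0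
termination_by (right - left + 1).toNat
decreasing_by
  · exact goB_dec1 h
  · exact goB_dec2 h

def find_local_min_alt (lst : List Int) : Int :=
  goB lst 0 ((lst.length : Int) - 1)

-- ===== PRECONDITION & SPEC =====
-- Pre_ excludes the empty list, on which A falls out of the loop and returns None (not an int).
def Pre_find_local_min (lst : List Int) : Prop := lst ≠ []
instance (lst : List Int) : Decidable (Pre_find_local_min lst) := by unfold Pre_find_local_min; infer_instance
def pvWitness_find_local_min : List Int := [3, 1, 2]

def Spec_find_local_min (lst : List Int) (out : Int) : Prop := out = find_local_min_alt lst
instance (lst : List Int) (out : Int) : Decidable (Spec_find_local_min lst out) := by unfold Spec_find_local_min; infer_instance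

-- ===== CLAIM (what is proved, stated in full; the proofs are below) =====
def Claim_equal_find_local_min : Prop := ∀ (lst : List Int), Dom_find_local_min lst → Pre_find_local_min lst → Spec_find_local_min lst (find_local_min lst)

-- ===== LEMMAS AND PROOFS =====

-- Loop/recursion agreement: with enough fuel and the window inside [0, n-1],
-- A's loop body and B's recursion take the same branches on the same state.
theorem findLoopA_eq_goB (lst : List Int) :
    ∀ (fuel : Nat) (left right : Int), 0 ≤ left → right ≤ (lst.length : Int) - 1 →
      (right - left + 1).toNat ≤ fuel → findLoopA lst left right fuel = goB lst left right := by
  intro fuel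
  induction fuel with
  | zero =>
    intro left right _ _ hfuel
    rw [goB]
    have hlr : ¬ left ≤ right := by omega
    simp only [findLoopA, dif_neg hlr]
  | succ fuel ih =>
    intro left right hl hr hfuel
    rw [goB]
    by_cases hlr : left ≤ right
    · have hmid := PySem.Int.floordiv_two_mid_bounds hlr
      simp only [findLoopA, if_pos hlr, dif_pos hlr]
      have hcomm : PySem.Int.floordiv (right + left) 2 = PySem.Int.floordiv (left + right) 2 := by
        rw [Int.add_comm]
      rw [hcomm]
      set mid := PySem.Int.floordiv (left + right) 2 with hmiddef
      by_cases h1 : (mid = 0 ∨ pvAt lst (mid - 1) ≥ pvAt lst mid) ∧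
          (mid = (lst.length : Int) - 1 ∨ pvAt lst mid ≤ pvAt lst (mid + 1))
      · rw [if_pos h1, if_pos h1]
      · rw [if_neg h1, if_neg h1]
        by_cases h2 : mid < (lst.length : Int) - 1 ∧ pvAt lst (mid + 1) < pvAt lst mid
        · rw [if_pos h2, if_pos h2]
          exact ih (mid + 1) right (by omega) hr (by omega)
        · rw [if_neg h2, if_neg h2]
          -- cond1 false and branch2 false force A's third guard to hold
          have h3 : 0 < mid ∧ pvAt lst (mid - 1) < pvAt lst mid := by
            rw [not_and_or] at h1 h2
            rcases h1 with ha | hb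
            · obtain ⟨ha1, ha2⟩ := not_or.mp ha
              exact ⟨by omega, by omega⟩
            · obtain ⟨hb1, hb2⟩ := not_or.mp hb
              exfalso
              rcases h2 with hc | hd
              · omega
              · omega
          rw [if_pos h3]
          exact ih left (mid - 1) hl (by omega) (by omega)
    · simp only [findLoopA, if_neg hlr, dif_neg hlr]

theorem find_local_min_spec : Claim_equal_find_local_min := by
  intro lst _ _
  unfold Spec_find_local_min find_local_min find_local_min_alt
  exact findLoopA_eq_goB lst (lst.length + 1) 0 ((lst.length : Int) - 1) le_rfl le_rfl (by omega)
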